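-- pv_equiv track=rewrite | github.com/kswoong1819/Python-Algorithm | practice/2020/2020_07~09/0913/naver_1.py | solution
-- ===== SOURCE A (Python) =====
-- def solution(boxes):
--     L = len(boxes)
--     product = {}
--     for p in boxes:
--         for i in range(2):
--             if p[i] not in product:
--                 product[p[i]] = 1
--             else:
--                 product[p[i]] += 1
--     even = 0
--     for i in product:
--         even += product[i] // 2
--     answer = L - even
--     return answer
-- ===== SOURCE B (Python) =====
-- def solution(boxes):
--     seen = set()
--     even = 0
--     for p in boxes:
--         for item in (p[0], p[1]):
--             if item in seen:
--                 seen.discard(item)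
--                 even += 1
--             else:
--                 seen.add(item)
--     return len(boxes) - even
-- ===== Notes on version B (the rewrite author's own statement) =====
-- stated objective: alternative
-- what changed: Replaces the count-everything dict plus a second summation loop over the counter with a single-pass eager pair-matching toggle: a set of currently-unmatched items where a repeat completes a pair immediately, so no counter and no second loop are needed.
import Mathlib
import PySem

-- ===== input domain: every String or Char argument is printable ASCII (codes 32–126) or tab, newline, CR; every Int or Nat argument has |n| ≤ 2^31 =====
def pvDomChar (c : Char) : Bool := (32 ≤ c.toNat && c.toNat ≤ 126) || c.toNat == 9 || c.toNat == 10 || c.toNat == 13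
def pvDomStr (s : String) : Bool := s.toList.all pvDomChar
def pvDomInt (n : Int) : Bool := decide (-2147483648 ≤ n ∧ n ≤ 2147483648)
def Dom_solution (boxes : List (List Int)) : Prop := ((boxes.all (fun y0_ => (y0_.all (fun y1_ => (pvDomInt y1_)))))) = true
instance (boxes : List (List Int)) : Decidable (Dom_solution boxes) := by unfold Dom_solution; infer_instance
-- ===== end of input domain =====

-- B replaces A's count-all-items dict plus a second summation loop with a single-pass
-- pair-matching toggle over a set of currently-unmatched items (objective: alternative).

-- ===== PORT A =====
-- p[i] is ported as PySem.List.pyGetD p i 0: exact under Pre_solution (every box has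
-- length ≥ 2, so the indices 0 and 1 never raise).
def solution (boxes : List (List Int)) : Int :=
  let L : Int := (boxes.length : Int)
  let product : PySem.Dict Int Int :=
    boxes.foldl (fun d p =>
      (PySem.List.pyRange 0 2 1).foldl (fun d i =>
        if d.contains (PySem.List.pyGetD p i 0) = false
        then d.insert (PySem.List.pyGetD p i 0) 1
        else d.insert (PySem.List.pyGetD p i 0) (d.getD (PySem.List.pyGetD p i 0) 0 + 1)) d)
      PySem.Dict.empty
  let even : Int :=
    product.keys.foldl (fun e k => e + PySem.Int.floordiv (product.getD k 0) 2) 0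
  L - even

-- ===== PORT B =====
def solution_alt (boxes : List (List Int)) : Int :=
  let st : PySem.Set Int × Int :=
    boxes.foldl (fun st p =>
      [PySem.List.pyGetD p 0 0, PySem.List.pyGetD p 1 0].foldl (fun st x =>
        if PySem.Set.contains st.1 x
        then (PySem.Set.discard st.1 x, st.2 + 1)
        else (PySem.Set.add st.1 x, st.2)) st)
      ((PySem.Set.empty : PySem.Set Int), (0 : Int))
  (boxes.length : Int) - st.2

-- ===== PRECONDITION & SPEC =====
-- Pre_: each box must have at least two elements; on shorter boxes both Pythons raise IndexError.
def Pre_solution (boxes : List (List Int)) : Prop := ∀ p ∈ boxes, 2 ≤ p.length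
instance (boxes : List (List Int)) : Decidable (Pre_solution boxes) := by unfold Pre_solution; infer_instance
def pvWitness_solution : List (List Int) := [[1, 2], [2, 3], [3, 1]]

def Spec_solution (boxes : List (List Int)) (out : Int) : Prop := out = solution_alt boxes
instance (boxes : List (List Int)) (out : Int) : Decidable (Spec_solution boxes out) := by unfold Spec_solution; infer_instance

-- ===== CLAIM (what is proved, stated in full; the proofs are below) =====
def Claim_equal_solution : Prop := ∀ (boxes : List (List Int)), Dom_solution boxes → Pre_solution boxes → Spec_solution boxes (solution boxes)

-- ===== LEMMAS AND PROOFS =====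

-- The common item stream: the first two entries of every box, in order.
def pvStream (boxes : List (List Int)) : List Int :=
  boxes.flatMap (fun p => [PySem.List.pyGetD p 0 0, PySem.List.pyGetD p 1 0])

-- A's per-item dict update is the Counter update.
theorem pvStepA_eq (d : PySem.Dict Int Int) (x : Int) :
    (if d.contains x = false then d.insert x 1 else d.insert x (d.getD x 0 + 1))
    = d.insert x (d.getD x 0 + 1) := by
  by_cases h : d.contains x = false
  · have h2 := (PySem.Dict.get?_eq_none_iff_contains d x).2 h
    simp [h, PySem.Dict.getD, h2]
  · simp [h]

theorem pvSolutionA (boxes : List (List Int)) :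
    solution boxes = (boxes.length : Int) -
      ((PySem.Set.ofList (pvStream boxes)).map
        (fun k => (((pvStream boxes).count k / 2 : ℕ) : ℤ))).sum := by
  have hrange : PySem.List.pyRange 0 2 1 = [0, 1] := by decide
  have hdict :
      boxes.foldl (fun d p =>
        (PySem.List.pyRange 0 2 1).foldl (fun d i =>
          if d.contains (PySem.List.pyGetD p i 0) = false
          then d.insert (PySem.List.pyGetD p i 0) 1
          else d.insert (PySem.List.pyGetD p i 0) (d.getD (PySem.List.pyGetD p i 0) 0 + 1)) d)
        PySem.Dict.empty
      = PySem.Dict.counter (pvStream boxes) := by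
    rw [← PySem.Dict.foldl_insert_getD_add_one_eq_counter, pvStream, List.foldl_flatMap]
    simp only [hrange, List.foldl_cons, List.foldl_nil, pvStepA_eq]
  show (boxes.length : Int) - _ = _
  rw [hdict]
  congr 1
  rw [PySem.Dict.keys_counter, PySem.List.foldl_add, zero_add]
  apply congrArg
  apply List.map_congr_left
  intro k _
  rw [PySem.Dict.getD_counter]
  simp [PySem.Int.floordiv, Int.fdiv_eq_ediv]

-- The toggle step of B.
def pvStepB (st : PySem.Set Int × Int) (x : Int) : PySem.Set Int × Int :=
  if PySem.Set.contains st.1 x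
  then (PySem.Set.discard st.1 x, st.2 + 1)
  else (PySem.Set.add st.1 x, st.2)

theorem pvSum_map_update (L : List Int) (f f' : Int → Int) (x : Int)
    (hL : L.Nodup) (hx : x ∈ L)
    (h1 : ∀ k, k ≠ x → f' k = f k) (h2 : f' x = f x + 1) :
    (L.map f').sum = (L.map f).sum + 1 := by
  induction L with
  | nil => cases hx
  | cons a t ih =>
    rcases List.nodup_cons.1 hL with ⟨hat, ht⟩
    rcases List.mem_cons.1 hx with rfl | hxt
    · have : t.map f' = t.map f := by
        apply List.map_congr_left
        intro k hk
        exact h1 k (by rintro rfl; exact hat hk)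
      simp [this, h2]; ring
    · have hax : a ≠ x := fun h => hat (h ▸ hxt)
      simp [h1 a hax, ih ht hxt]; ring

-- Invariant of B's single pass: the counter value is what a count-then-halve pass computes,
-- and the set holds exactly the items seen an odd number of times so far.
theorem pvMainB (s : List Int) :
    (s.foldl pvStepB ((PySem.Set.empty : PySem.Set Int), (0 : Int))).2
      = ((PySem.Set.ofList s).map (fun k => ((s.count k / 2 : ℕ) : ℤ))).sum
    ∧ ∀ k : Int, k ∈ (s.foldl pvStepB ((PySem.Set.empty : PySem.Set Int), (0 : Int))).1
        ↔ s.count k % 2 = 1 := by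
  induction s using List.reverseRecOn with
  | nil => simp [PySem.Set.empty, PySem.Set.ofList]
  | append_singleton s x ih =>
    obtain ⟨iha, ihb⟩ := ih
    set S := s.foldl pvStepB ((PySem.Set.empty : PySem.Set Int), (0 : Int)) with hS
    have hcount : ∀ k : Int, (s ++ [x]).count k = s.count k + (if k = x then 1 else 0) := by
      intro k
      by_cases h : k = x <;>
        simp [List.count_append, List.count_cons, List.count_nil, h] <;>
        try omega
    rw [List.foldl_append, List.foldl_cons, List.foldl_nil]
    by_cases hmem : x ∈ S.1
    · -- x currently unmatched: completes a pair
      have hodd : s.count x % 2 = 1 := (ihb x).1 hmem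
      have hcontains : PySem.Set.contains S.1 x = true := (PySem.Set.contains_iff S.1 x).2 hmem
      have hstep : pvStepB S x = (PySem.Set.discard S.1 x, S.2 + 1) := by
        simp [pvStepB, hmem]
      rw [hstep]
      have hxs : x ∈ s := List.count_pos_iff.1 (by omega)
      have hset : PySem.Set.ofList (s ++ [x]) = PySem.Set.ofList s := by
        rw [PySem.Set.ofList_append_singleton,
            PySem.Set.add_of_mem ((PySem.Set.mem_ofList s x).2 hxs)]
      constructor
      · rw [hset]
        rw [pvSum_map_update (PySem.Set.ofList s)
              (fun k => ((s.count k / 2 : ℕ) : ℤ))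
              (fun k => (((s ++ [x]).count k / 2 : ℕ) : ℤ)) x
              (PySem.Set.nodup_ofList s) ((PySem.Set.mem_ofList s x).2 hxs)
              (fun k hk => by
                show (((s ++ [x]).count k / 2 : ℕ) : ℤ) = ((s.count k / 2 : ℕ) : ℤ)
                rw [hcount k, if_neg hk, Nat.add_zero])
              (by
                show (((s ++ [x]).count x / 2 : ℕ) : ℤ) = ((s.count x / 2 : ℕ) : ℤ) + 1
                rw [hcount x, if_pos rfl]
                omega)]
        rw [iha]
      · intro k
        show k ∈ PySem.Set.discard S.1 x ↔ _
        rw [PySem.Set.mem_discard, ihb k, hcount k]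
        by_cases hk : k = x
        · subst hk
          simp only [ne_eq, not_true_eq_false, and_false, false_iff, if_true]
          omega
        · simp [hk]
    · -- x not yet seen oddly: starts a (half-)pair
      have heven : ¬ s.count x % 2 = 1 := fun h => hmem ((ihb x).2 h)
      have hcontains : PySem.Set.contains S.1 x = false := by
        rw [← Bool.not_eq_true]
        exact fun h => hmem ((PySem.Set.contains_iff S.1 x).1 h)
      have hstep : pvStepB S x = (PySem.Set.add S.1 x, S.2) := by
        simp [pvStepB, hmem]
      rw [hstep]
      have hf : (fun k => (((s ++ [x]).count k / 2 : ℕ) : ℤ))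
          = fun k => ((s.count k / 2 : ℕ) : ℤ) := by
        funext k
        rw [hcount k]
        by_cases hk : k = x
        · subst hk; rw [if_pos rfl]; omega
        · rw [if_neg hk, Nat.add_zero]
      constructor
      · show S.2 = _
        rw [PySem.Set.ofList_append_singleton, hf]
        by_cases hin : x ∈ PySem.Set.ofList s
        · rw [PySem.Set.add_of_mem hin]; exact iha
        · rw [PySem.Set.add_of_not_mem hin]
          have hx0 : s.count x = 0 := by
            have : x ∉ s := fun h => hin ((PySem.Set.mem_ofList s x).2 h)
            exact List.count_eq_zero.2 this
          simp [iha, hx0]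
      · intro k
        show k ∈ PySem.Set.add S.1 x ↔ _
        rw [PySem.Set.mem_add, ihb k, hcount k]
        by_cases hk : k = x
        · subst hk
          simp only [or_true, true_iff, if_true]
          omega
        · simp [hk]

theorem pvSolutionB (boxes : List (List Int)) :
    solution_alt boxes = (boxes.length : Int) -
      ((PySem.Set.ofList (pvStream boxes)).map
        (fun k => (((pvStream boxes).count k / 2 : ℕ) : ℤ))).sum := by
  show (boxes.length : Int) - _ = _
  congr 1
  have hfold :
      boxes.foldl (fun st p =>
        [PySem.List.pyGetD p 0 0, PySem.List.pyGetD p 1 0].foldl (fun st x =>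
          if PySem.Set.contains st.1 x
          then (PySem.Set.discard st.1 x, st.2 + 1)
          else (PySem.Set.add st.1 x, st.2)) st)
        ((PySem.Set.empty : PySem.Set Int), (0 : Int))
      = (pvStream boxes).foldl pvStepB ((PySem.Set.empty : PySem.Set Int), (0 : Int)) := by
    rw [pvStream, List.foldl_flatMap]
    rfl
  rw [hfold, (pvMainB (pvStream boxes)).1]

-- ===== VERDICT (by name: the statement is the Claim_ definition above) =====
theorem solution_spec : Claim_equal_solution := by
  intro boxes _ _
  unfold Spec_solution
  rw [pvSolutionA, pvSolutionB]
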